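-- pv_equiv track=rewrite | github.com/hitechcloud-vietnam/nvidia-ai-hub | daemon/services/registry_service.py | _extract_recipe_slug_from_path
-- ===== SOURCE A (Python) =====
-- def _extract_recipe_slug_from_path(path_value: str) -> str | None:
--     path = path_value.strip().replace('\\', '/')
--     marker = 'registry/recipes/'
--     if marker not in path:
--         return None
--     suffix = path.split(marker, 1)[1]
--     parts = [part for part in suffix.split('/') if part]
--     if not parts:
--         return None
--     return parts[0]
-- ===== SOURCE B (Python) =====
-- def _extract_recipe_slug_from_path(path_value: str) -> str | None:
--     path = path_value.strip().replace('\\', '/')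
--     i = path.find('registry/recipes/')
--     if i == -1:
--         return None
--     slug = []
--     for ch in path[i + len('registry/recipes/'):]:
--         if ch == '/':
--             if slug:
--                 break
--         else:
--             slug.append(ch)
--     return ''.join(slug) if slug else None
-- ===== Notes on version B (the rewrite author's own statement) =====
-- stated objective: alternative
-- what changed: Replaces the marker-split plus segment-split-and-filter pipeline by a single find() of the marker followed by one character scan that skips leading separators and collects the slug, building no intermediate segment lists.
import Mathlib
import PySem

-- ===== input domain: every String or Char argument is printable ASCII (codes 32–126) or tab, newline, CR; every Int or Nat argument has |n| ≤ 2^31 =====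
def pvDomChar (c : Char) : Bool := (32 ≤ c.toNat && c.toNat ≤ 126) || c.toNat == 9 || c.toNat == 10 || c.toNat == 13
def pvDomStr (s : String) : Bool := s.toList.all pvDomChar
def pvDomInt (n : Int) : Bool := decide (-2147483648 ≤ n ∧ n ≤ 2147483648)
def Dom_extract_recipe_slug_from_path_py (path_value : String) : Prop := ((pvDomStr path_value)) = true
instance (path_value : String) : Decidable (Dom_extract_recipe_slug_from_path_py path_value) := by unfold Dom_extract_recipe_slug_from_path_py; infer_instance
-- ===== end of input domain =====

-- B replaces A's marker-split plus segment-split-and-filter pipeline by find() plus one character scan (alternative decomposition, same cost).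

-- ===== PORT A =====
-- literal transliteration of A (PySem.Str.* are thin wrappers over PySem.Chars.* on .toList; we work on the char lists directly)
def extract_recipe_slug_from_path_py (path_value : String) : Option String :=
  let path : List Char := PySem.Chars.replace (PySem.Chars.strip path_value.toList) ['\\'] ['/']
  let marker : List Char := "registry/recipes/".toList
  if PySem.Chars.isIn marker path = false then none
  else
    -- path.split(marker, 1)[1]: the [1] always exists here since marker ∈ path
    let suffix := (PySem.Chars.splitOnMax path marker 1).getD 1 []
    match (PySem.Chars.splitOn suffix ['/']).filter (fun part => !part.isEmpty) with
    | [] => none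
    | p :: _ => some (String.ofList p)

-- ===== PORT B =====
-- the for-loop of Source B: skip leading '/', collect slug chars, break at the '/' after a nonempty slug
def pvSlugScan : List Char → List Char → List Char
  | [], slug => slug
  | c :: rest, slug =>
    if c = '/' then (if slug.isEmpty then pvSlugScan rest slug else slug)
    else pvSlugScan rest (slug ++ [c])

def extract_recipe_slug_from_path_py_alt (path_value : String) : Option String :=
  let path : List Char := PySem.Chars.replace (PySem.Chars.strip path_value.toList) ['\\'] ['/']
  let i := PySem.Chars.find path "registry/recipes/".toList
  if i = -1 then none
  else
    let slug := pvSlugScan (PySem.List.slice path (some (i + ("registry/recipes/".toList.length : Int))) none) []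
    if slug.isEmpty then none else some (String.ofList slug)

-- ===== PRECONDITION & SPEC =====
def Spec_extract_recipe_slug_from_path_py (path_value : String) (out : Option String) : Prop := out = extract_recipe_slug_from_path_py_alt path_value
instance (path_value : String) (out : Option String) : Decidable (Spec_extract_recipe_slug_from_path_py path_value out) := by unfold Spec_extract_recipe_slug_from_path_py; infer_instance

-- ===== CLAIM (what is proved, stated in full; the proofs are below) =====
def Claim_equal_extract_recipe_slug_from_path_py : Prop := ∀ (path_value : String), Dom_extract_recipe_slug_from_path_py path_value → Spec_extract_recipe_slug_from_path_py path_value (extract_recipe_slug_from_path_py path_value)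

-- ===== LEMMAS AND PROOFS =====

-- find.go shifts its index argument additively
lemma pv_findGo_shift (sub : List Char) (t : List Char) : ∀ (k : Nat),
    PySem.Chars.find.go sub t k =
      if PySem.Chars.find.go sub t 0 = -1 then -1 else PySem.Chars.find.go sub t 0 + k := by
  induction t with
  | nil =>
    intro k
    simp [PySem.Chars.find.go]
    split <;> simp
  | cons c rest ih =>
    intro k
    rw [PySem.Chars.find.go]
    conv_rhs => rw [PySem.Chars.find.go]
    split
    · simp
    · rw [ih (k+1), ih 1]
      have h := PySem.Chars.neg_one_le_find rest sub
      simp only [PySem.Chars.find] at h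
      split <;> split <;> push_cast <;> omega

lemma pv_find_cons (sub : List Char) (c : Char) (t : List Char) :
    PySem.Chars.find (c :: t) sub =
      if sub.isPrefixOf (c :: t) then 0
      else if PySem.Chars.find t sub = -1 then -1 else PySem.Chars.find t sub + 1 := by
  simp only [PySem.Chars.find]
  rw [PySem.Chars.find.go]
  split
  · simp
  · rw [pv_findGo_shift sub t 1]
    simp

lemma pv_find_nil (sub : List Char) (hsep : sub ≠ []) : PySem.Chars.find [] sub = -1 := by
  simp [PySem.Chars.find, PySem.Chars.find.go, hsep]

-- splitOnMax.go with maxsplit budget 0 returns immediately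
lemma pv_goMax_zero (sep : List Char) (fuel : Nat) (l cur : List Char) (acc : List (List Char)) :
    PySem.Chars.splitOnMax.go sep fuel 0 l cur acc = ((cur.reverse ++ l) :: acc).reverse := by
  cases fuel with
  | zero => rw [PySem.Chars.splitOnMax.go]
  | succ f => cases l with
    | nil => rw [PySem.Chars.splitOnMax.go]; simp; omega
    | cons c rest => rw [PySem.Chars.splitOnMax.go]; simp

-- splitOnMax.go with budget 1 splits at the first occurrence (located by find)
lemma pv_goMax_one (sep : List Char) (hsep : sep ≠ []) : ∀ (fuel : Nat) (l cur : List Char) (acc : List (List Char)),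
    l.length ≤ fuel →
    PySem.Chars.splitOnMax.go sep fuel 1 l cur acc =
      if PySem.Chars.find l sep = -1 then ((cur.reverse ++ l) :: acc).reverse
      else acc.reverse ++ [cur.reverse ++ l.take (PySem.Chars.find l sep).toNat,
                           l.drop ((PySem.Chars.find l sep).toNat + sep.length)] := by
  intro fuel
  induction fuel with
  | zero =>
    intro l cur acc hlen
    have : l = [] := by cases l <;> simp_all
    subst this
    rw [PySem.Chars.splitOnMax.go, pv_find_nil sep hsep]
    simp
  | succ f ih =>
    intro l cur acc hlen
    cases l with
    | nil =>
      rw [PySem.Chars.splitOnMax.go, pv_find_nil sep hsep]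
      simp
      omega
    | cons c rest =>
      rw [PySem.Chars.splitOnMax.go]
      simp only [if_false, one_ne_zero]
      rw [pv_find_cons sep c rest]
      split
      · -- sep is a prefix of c :: rest
        rw [pv_goMax_zero]
        simp
      · -- not a prefix
        rw [ih rest (c :: cur) acc (by simpa using Nat.lt_succ_iff.mp (by simpa using hlen))]
        have hge := PySem.Chars.neg_one_le_find rest sep
        split
        · simp
        · rename_i hne
          have ht : (PySem.Chars.find rest sep + 1).toNat = (PySem.Chars.find rest sep).toNat + 1 := by omega
          rw [if_neg (by omega)]
          simp [ht, List.take_succ_cons, List.drop_succ_cons, Nat.add_right_comm]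

-- structural version of split('/')
def pvSplitChar : List Char → List Char → List (List Char)
  | cur, [] => [cur]
  | cur, c :: rest => if c = '/' then cur :: pvSplitChar [] rest else pvSplitChar (cur ++ [c]) rest

lemma pv_splitOnGo_char (fuel : Nat) : ∀ (l cur : List Char) (acc : List (List Char)),
    l.length ≤ fuel →
    PySem.Chars.splitOn.go ['/'] fuel l cur acc = acc.reverse ++ pvSplitChar cur.reverse l := by
  induction fuel with
  | zero =>
    intro l cur acc hlen
    have : l = [] := by cases l <;> simp_all
    subst this
    rw [PySem.Chars.splitOn.go]
    simp [pvSplitChar]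
  | succ f ih =>
    intro l cur acc hlen
    cases l with
    | nil => rw [PySem.Chars.splitOn.go]; simp [pvSplitChar]; omega
    | cons c rest =>
      rw [PySem.Chars.splitOn.go]
      by_cases hc : c = '/'
      · subst hc
        rw [if_pos (by simp [List.isPrefixOf])]
        simp only [List.length_cons, List.length_nil, List.drop_succ_cons, List.drop_zero]
        rw [ih rest [] (List.reverse cur :: acc) (by simpa using Nat.lt_succ_iff.mp (by simpa using hlen))]
        simp [pvSplitChar]
      · rw [if_neg (by simp [List.isPrefixOf]; exact fun h => hc h.symm)]
        rw [ih rest (c :: cur) acc (by simpa using Nat.lt_succ_iff.mp (by simpa using hlen))]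
        simp [pvSplitChar, hc]

lemma pv_splitOn_char (l : List Char) :
    PySem.Chars.splitOn l ['/'] = pvSplitChar [] l := by
  rw [PySem.Chars.splitOn, pv_splitOnGo_char (l.length + 1) l [] [] (by omega)]
  simp

-- first nonempty piece of the split = the character scan
lemma pv_firstNE_eq_scan (l : List Char) : ∀ (cur : List Char),
    ((pvSplitChar cur l).filter (fun part => !part.isEmpty)).head? =
      (if (pvSlugScan l cur).isEmpty then none else some (pvSlugScan l cur)) := by
  induction l with
  | nil =>
    intro cur
    cases cur <;> simp [pvSplitChar, pvSlugScan]
  | cons c rest ih =>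
    intro cur
    by_cases hc : c = '/'
    · subst hc
      by_cases hcur : cur = []
      · subst hcur
        simp [pvSplitChar, pvSlugScan, ih]
      · have hne : cur.isEmpty = false := by simpa using hcur
        simp [pvSplitChar, pvSlugScan, hne]
    · simp [pvSplitChar, pvSlugScan, hc, ih]

-- ===== VERDICT (by name: the statement is the Claim_ definition above) =====
theorem extract_recipe_slug_from_path_py_spec : Claim_equal_extract_recipe_slug_from_path_py := by
  intro s _
  unfold Spec_extract_recipe_slug_from_path_py
  unfold extract_recipe_slug_from_path_py extract_recipe_slug_from_path_py_alt
  set p : List Char := PySem.Chars.replace (PySem.Chars.strip s.toList) ['\\'] ['/'] with hp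
  set m : List Char := "registry/recipes/".toList with hmm
  have hm : m ≠ [] := by decide
  by_cases hf : PySem.Chars.find p m = -1
  · simp [PySem.Chars.isIn, hf]
  · have hge := PySem.Chars.neg_one_le_find p m
    have h0 : 0 ≤ PySem.Chars.find p m := by omega
    set i : Int := PySem.Chars.find p m with hi
    have hsplit : PySem.Chars.splitOnMax p m 1 = [p.take i.toNat, p.drop (i.toNat + m.length)] := by
      rw [PySem.Chars.splitOnMax, if_neg (by omega)]
      have h1 : (1 : Int).toNat = 1 := by omega
      rw [h1, pv_goMax_one m hm (p.length + 1) p [] [] (by omega), if_neg hf]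
      simp [← hi]
    have hslice : PySem.List.slice p (some (i + (m.length : Int))) none = p.drop (i.toNat + m.length) := by
      rw [PySem.List.slice_from p (show (0:Int) ≤ i + (m.length : Int) by omega)]
      congr 1
      omega
    have hscan := pv_firstNE_eq_scan (p.drop (i.toNat + m.length)) []
    simp only [PySem.Chars.isIn, ← hi, hsplit, hslice, pv_splitOn_char, List.getD,
      List.getElem?_cons_succ, List.getElem?_cons_zero, Option.getD_some]
    rw [if_neg (by simp [hf]), if_neg hf]
    by_cases he : (pvSlugScan (p.drop (i.toNat + m.length)) []).isEmpty
    · have hnil : (pvSplitChar [] (p.drop (i.toNat + m.length))).filter (fun part => !part.isEmpty) = [] := by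
        rw [← List.head?_eq_none_iff, hscan]
        simp [he]
      rw [hnil]
      simp [he]
    · have hhd : ((pvSplitChar [] (p.drop (i.toNat + m.length))).filter (fun part => !part.isEmpty)).head?
          = some (pvSlugScan (p.drop (i.toNat + m.length)) []) := by
        rw [hscan]
        simp [he]
      cases hres : (pvSplitChar [] (p.drop (i.toNat + m.length))).filter (fun part => !part.isEmpty) with
      | nil => rw [hres] at hhd; simp at hhd
      | cons q t =>
        rw [hres] at hhd
        simp only [List.head?_cons, Option.some_inj] at hhd
        simp [he, hhd]
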